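-- pv_equiv track=rewrite | github.com/tomputer-g/16891-mapf-darpa | single_agent_planner.py | generate_motions_recursive
-- ===== SOURCE A (Python) =====
-- def generate_motions_recursive(num_agents: int, cur_agent: int):
--     # directions = [(0, -1), (1, 0), (0, 1), (-1, 0), (0, 0)]
--     directions = range(5)
--
--     joint_state_motions = [[dir] for dir in directions]
--     for i in range(1, num_agents):
--         expanded_motions = []
--         for jsm in joint_state_motions:
--             for dir in directions:
--                 # Expanded motions gets all combinations of previous joint state motions + new direction
--                 expanded_motions.append(jsm + [dir])
--         joint_state_motions = expanded_motions
--
--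
--     return joint_state_motions
-- ===== SOURCE B (Python) =====
-- def generate_motions_recursive(num_agents: int, cur_agent: int):
--     if num_agents <= 1:
--         return [[d] for d in range(5)]
--     tails = generate_motions_recursive(num_agents - 1, cur_agent)
--     return [[d] + suffix for d in range(5) for suffix in tails]
-- ===== Notes on version B (the rewrite author's own statement) =====
-- stated objective: alternative
-- what changed: Replaces A's iterative repeated-expansion loop (rebuilding the whole list of joint motions once per extra agent, appending a direction at the end) with a direct recursion on num_agents that prepends each direction to the recursively built shorter suffixes.
import Mathlib
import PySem

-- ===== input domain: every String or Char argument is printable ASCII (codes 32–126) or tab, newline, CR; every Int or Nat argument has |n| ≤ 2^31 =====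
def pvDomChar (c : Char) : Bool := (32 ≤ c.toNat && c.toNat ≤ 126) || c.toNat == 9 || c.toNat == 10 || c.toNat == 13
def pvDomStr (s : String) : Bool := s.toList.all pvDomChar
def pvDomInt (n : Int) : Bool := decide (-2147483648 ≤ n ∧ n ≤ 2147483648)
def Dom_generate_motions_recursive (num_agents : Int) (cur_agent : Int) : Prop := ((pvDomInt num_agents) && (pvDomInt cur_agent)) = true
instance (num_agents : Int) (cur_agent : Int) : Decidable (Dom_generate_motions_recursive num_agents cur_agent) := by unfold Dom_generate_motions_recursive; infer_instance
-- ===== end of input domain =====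

-- B replaces A's iterative per-agent expansion loop with a direct recursion on num_agents
-- (prepending each direction to the recursively built suffixes); same values, alternative structure.

-- ===== PORT A =====
def generate_motions_recursive (num_agents : Int) (cur_agent : Int) : List (List Int) :=
  let directions := PySem.List.pyRange 0 5 1
  let joint_state_motions := directions.map (fun dir => [dir])
  (PySem.List.pyRange 1 num_agents 1).foldl
    (fun joint_state_motions _i =>
      joint_state_motions.foldl
        (fun expanded_motions jsm =>
          directions.foldl (fun expanded_motions dir => expanded_motions ++ [jsm ++ [dir]])
            expanded_motions)
        [])
    joint_state_motions

-- ===== PORT B =====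
def generate_motions_recursive_alt (num_agents : Int) (cur_agent : Int) : List (List Int) :=
  if num_agents ≤ 1 then
    (PySem.List.pyRange 0 5 1).map (fun d => [d])
  else
    let tails := generate_motions_recursive_alt (num_agents - 1) cur_agent
    (PySem.List.pyRange 0 5 1).flatMap (fun d => tails.map (fun suffix => d :: suffix))
termination_by num_agents.toNat
decreasing_by omega

-- ===== PRECONDITION & SPEC =====
def Spec_generate_motions_recursive (num_agents : Int) (cur_agent : Int) (out : List (List Int)) : Prop := out = generate_motions_recursive_alt num_agents cur_agent
instance (num_agents : Int) (cur_agent : Int) (out : List (List Int)) : Decidable (Spec_generate_motions_recursive num_agents cur_agent out) := by unfold Spec_generate_motions_recursive; infer_instance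

-- ===== CLAIM (what is proved, stated in full; the proofs are below) =====
def Claim_equal_generate_motions_recursive : Prop := ∀ (num_agents : Int) (cur_agent : Int), Dom_generate_motions_recursive num_agents cur_agent → Spec_generate_motions_recursive num_agents cur_agent (generate_motions_recursive num_agents cur_agent)

-- ===== LEMMAS AND PROOFS =====

/-- All length-(k+1) direction tuples in lexicographic order: the common value of both programs. -/
def pvTuples : Nat → List (List Int)
  | 0 => (PySem.List.pyRange 0 5 1).map (fun d => [d])
  | k + 1 => (PySem.List.pyRange 0 5 1).flatMap (fun d => (pvTuples k).map (fun s => d :: s))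

/-- A's one expansion step, written as flatMap (generalised over the accumulator). -/
lemma pvStep_eq_gen (jsms : List (List Int)) (acc : List (List Int)) :
    jsms.foldl
      (fun expanded_motions jsm =>
        (PySem.List.pyRange 0 5 1).foldl
          (fun expanded_motions dir => expanded_motions ++ [jsm ++ [dir]]) expanded_motions)
      acc
    = acc ++ jsms.flatMap (fun jsm => (PySem.List.pyRange 0 5 1).map (fun dir => jsm ++ [dir])) := by
  induction jsms generalizing acc with
  | nil => simp
  | cons x xs ih =>
      rw [List.foldl_cons, PySem.List.foldl_append_singleton_eq_map, ih,
        List.flatMap_cons, List.append_assoc]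

lemma pvStep_eq (jsms : List (List Int)) :
    jsms.foldl
      (fun expanded_motions jsm =>
        (PySem.List.pyRange 0 5 1).foldl
          (fun expanded_motions dir => expanded_motions ++ [jsm ++ [dir]]) expanded_motions)
      []
    = jsms.flatMap (fun jsm => (PySem.List.pyRange 0 5 1).map (fun dir => jsm ++ [dir])) := by
  rw [pvStep_eq_gen]; rfl

/-- Expanding all k-tuples by one trailing direction yields the (k+1)-tuples. -/
lemma pvStep_tuples (k : Nat) :
    (pvTuples k).flatMap (fun jsm => (PySem.List.pyRange 0 5 1).map (fun dir => jsm ++ [dir]))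
      = pvTuples (k + 1) := by
  induction k with
  | zero => decide
  | succ k ih =>
      show (pvTuples (k+1)).flatMap _ = pvTuples (k+2)
      rw [pvTuples, List.flatMap_assoc]
      conv_rhs => rw [pvTuples, ← ih]
      simp [List.map_flatMap, List.flatMap_map, Function.comp_def]

/-- A's loop only counts iterations; folding over any list iterates the step list.length times. -/
lemma pvFoldl_const {α β : Type} (F : β → β) (l : List α) (init : β) :
    l.foldl (fun s _ => F s) init = F^[l.length] init := by
  induction l generalizing init with
  | nil => rfl
  | cons x xs ih => simp [List.foldl_cons, ih, Function.iterate_succ_apply]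

lemma pvIter_tuples (L : Nat) :
    (fun jsms : List (List Int) =>
      jsms.flatMap (fun jsm => (PySem.List.pyRange 0 5 1).map (fun dir => jsm ++ [dir])))^[L]
      (pvTuples 0) = pvTuples L := by
  induction L with
  | zero => rfl
  | succ L ih => rw [Function.iterate_succ_apply', ih, pvStep_tuples]

lemma pvA_eq_tuples (n c : Int) :
    generate_motions_recursive n c = pvTuples (n - 1).toNat := by
  unfold generate_motions_recursive
  simp only []
  have h : ∀ (l : List Int) (init : List (List Int)),
      l.foldl
        (fun jsms _ =>
          jsms.foldl
            (fun em jsm =>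
              (PySem.List.pyRange 0 5 1).foldl (fun em dir => em ++ [jsm ++ [dir]]) em)
            [])
        init
      = (fun jsms : List (List Int) =>
          jsms.flatMap (fun jsm => (PySem.List.pyRange 0 5 1).map (fun dir => jsm ++ [dir])))^[l.length]
          init := by
    intro l init
    rw [← pvFoldl_const]
    exact PySem.List.foldl_congr_mem _ _ _ _ (fun s x _ => pvStep_eq s)
  rw [h, PySem.List.length_pyRange_one]
  exact pvIter_tuples _

lemma pvB_eq_tuples (n c : Int) :
    generate_motions_recursive_alt n c = pvTuples (n - 1).toNat := by
  by_cases h : n ≤ 1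
  · rw [generate_motions_recursive_alt, if_pos h]
    have : (n - 1).toNat = 0 := by omega
    rw [this]; rfl
  · rw [generate_motions_recursive_alt, if_neg h, pvB_eq_tuples (n - 1) c]
    have h2 : (n - 1).toNat = (n - 1 - 1).toNat + 1 := by omega
    rw [h2]; rfl
termination_by n.toNat
decreasing_by omega

-- ===== VERDICT (by name: the statement is the Claim_ definition above) =====
theorem generate_motions_recursive_spec : Claim_equal_generate_motions_recursive := by
  intro n c _
  unfold Spec_generate_motions_recursive
  rw [pvA_eq_tuples, pvB_eq_tuples]
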